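-- pv_equiv track=rewrite | github.com/okdesign21/ortflix-telegram | config.py | _clean_username
-- ===== SOURCE A (Python) =====
-- from typing import Callable, Optional
--
-- def _clean_username(name: Optional[str]) -> Optional[str]:
--     """Slugify username: ASCII alphanumeric + hyphens only (for display).
--     Returns None if username contains non-ASCII characters.
--     Identical to tautulli_utils._clean_username for consistency.
--     """
--     if not name:
--         return None
--     # Only keep ASCII letters, digits, and replace others with hyphens
--     cleaned = "".join(ch.lower() if (ch.isascii() and ch.isalnum()) else "-" for ch in str(name))
--     cleaned = cleaned.strip("-")
--     while "--" in cleaned: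
--         cleaned = cleaned.replace("--", "-")
--     # If no valid ASCII alphanumeric chars remain, return None for fallback
--     if not cleaned or not any(ch.isascii() and ch.isalnum() for ch in cleaned):
--         return None
--     return cleaned
-- ===== SOURCE B (Python) =====
-- from typing import Optional
--
-- def _clean_username(name: Optional[str]) -> Optional[str]:
--     """Slugify username: one pass grouping ASCII-alnum runs, joined by single hyphens."""
--     if not name:
--         return None
--     words = []
--     buf = []
--     for ch in str(name):
--         if ch.isascii() and ch.isalnum():
--             buf.append(ch.lower())
--         elif buf:
--             words.append("".join(buf))
--             buf = []
--     if buf: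
--         words.append("".join(buf))
--     if not words:
--         return None
--     return "-".join(words)
-- ===== Notes on version B (the rewrite author's own statement) =====
-- stated objective: simpler
-- what changed: Replaces A's three-phase pipeline (per-char substitution into a hyphen-marked string, then strip, then a repeated replace loop that collapses double hyphens) with a single grouping pass that collects maximal ASCII-alphanumeric runs as words and joins them with single hyphens.
import Mathlib
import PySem

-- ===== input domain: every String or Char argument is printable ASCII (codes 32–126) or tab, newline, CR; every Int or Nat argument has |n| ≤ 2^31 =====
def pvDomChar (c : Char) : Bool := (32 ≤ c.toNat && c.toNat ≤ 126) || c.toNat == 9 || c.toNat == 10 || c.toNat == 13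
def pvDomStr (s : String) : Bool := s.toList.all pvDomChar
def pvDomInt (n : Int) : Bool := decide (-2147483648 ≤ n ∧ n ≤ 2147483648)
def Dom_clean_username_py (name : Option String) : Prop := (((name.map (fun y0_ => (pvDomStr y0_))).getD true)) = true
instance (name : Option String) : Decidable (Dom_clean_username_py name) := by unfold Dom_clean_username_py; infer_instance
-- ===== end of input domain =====

-- B replaces A's substitute-strip-collapse pipeline by one grouping pass over the string (same values; not timed as faster).

-- ===== PORT A =====
-- ch.isascii() ported by hand as ch.toNat ≤ 127 (exact: Python tests code point < 128)
def pyIsAscii (c : Char) : Bool := c.toNat ≤ 127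

def cleanStep (ch : Char) : Char :=
  if pyIsAscii ch && PySem.Chars.isalnum ch then PySem.Chars.lowerChar ch else '-'

-- spec of PySem.Chars.replace s "--" "-" used only to justify termination of the while loop
def rep : List Char → List Char
  | [] => []
  | [c] => [c]
  | c1 :: c2 :: t => if c1 = '-' ∧ c2 = '-' then '-' :: rep t else c1 :: rep (c2 :: t)

theorem rep_go (l acc : List Char) (fuel : Nat) (h : l.length ≤ fuel) :
    PySem.Chars.replace.go ['-','-'] ['-'] fuel l acc = acc.reverse ++ rep l := by
  induction fuel generalizing l acc with
  | zero =>
    have : l = [] := List.length_eq_zero_iff.mp (Nat.le_zero.mp h)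
    subst this; simp [PySem.Chars.replace.go, rep]
  | succ n ih =>
    match l with
    | [] => simp [PySem.Chars.replace.go, rep]
    | [c] =>
      rw [PySem.Chars.replace.go]
      have hp : List.isPrefixOf ['-','-'] [c] = false := by
        simp [List.isPrefixOf]
      simp only [hp, Bool.false_eq_true, if_false]
      rw [ih [] (c :: acc) (by simp)]
      simp [rep]
    | c1 :: c2 :: t =>
      by_cases hd : c1 = '-' ∧ c2 = '-'
      · obtain ⟨h1, h2⟩ := hd; subst h1; subst h2
        rw [PySem.Chars.replace.go]
        have hp : List.isPrefixOf ['-','-'] ('-'::'-'::t) = true := by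
          simp [List.isPrefixOf]
        simp only [hp, if_true]
        have ht : t.length ≤ n := by simp at h; omega
        rw [show List.drop (['-','-'] : List Char).length ('-'::'-'::t) = t from rfl, ih t (['-'].reverse ++ acc) ht]
        simp [rep]
      · rw [PySem.Chars.replace.go]
        have hp : List.isPrefixOf ['-','-'] (c1::c2::t) = false := by
          by_cases h1 : c1 = '-'
          · subst h1
            have h2 : ¬ c2 = '-' := fun hc => hd ⟨rfl, hc⟩
            simp [List.isPrefixOf, beq_iff_eq]
            exact fun hc => absurd hc.symm h2
          · simp [List.isPrefixOf, beq_iff_eq]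
            exact fun hc => absurd hc.symm h1
        simp only [hp, Bool.false_eq_true, if_false]
        rw [ih (c2 :: t) (c1 :: acc) (by simp at h ⊢; omega)]
        simp [rep, hd]

theorem replace_eq_rep (cs : List Char) :
    PySem.Chars.replace cs ['-','-'] ['-'] = rep cs := by
  rw [PySem.Chars.replace]
  simp only [List.isEmpty, Bool.false_eq_true, if_false]
  exact rep_go cs [] cs.length le_rfl

theorem rep_length_le (cs : List Char) : (rep cs).length ≤ cs.length := by
  induction cs using rep.induct with
  | case1 => simp [rep]
  | case2 c => simp [rep]
  | case3 c1 c2 t hd ih => simp [rep, hd]; omega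
  | case4 c1 c2 t hd ih => simp [rep, hd] at ih ⊢; omega

theorem rep_length_lt (cs : List Char) (h : ['-','-'] <:+: cs) :
    (rep cs).length < cs.length := by
  induction cs using rep.induct with
  | case1 => simp at h
  | case2 c =>
    rcases h with ⟨p, s, hps⟩
    have := congrArg List.length hps; simp at this; omega
  | case3 c1 c2 t hd ih =>
    obtain ⟨h1, h2⟩ := hd; subst h1; subst h2
    have := rep_length_le t
    simp [rep]; omega
  | case4 c1 c2 t hd ih =>
    have h' : ['-','-'] <:+: (c2 :: t) := by
      rcases h with ⟨p, s, hps⟩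
      cases p with
      | nil =>
        simp at hps
        exact absurd ⟨hps.1.symm, hps.2.1.symm⟩ hd
      | cons a p' =>
        refine ⟨p', s, ?_⟩
        simpa using congrArg List.tail hps
    have := ih h'
    simp [rep, hd] at this ⊢
    omega

def collapseLoop (cs : List Char) : List Char :=
  if PySem.Chars.isIn ['-','-'] cs then collapseLoop (PySem.Chars.replace cs ['-','-'] ['-']) else cs
termination_by cs.length
decreasing_by
  rw [replace_eq_rep]
  exact rep_length_lt _ ((PySem.Chars.isIn_iff_infix _ _).mp (by assumption))

def clean_username_py (name : Option String) : Option String :=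
  match name with
  | none => none
  | some s =>
    if s.toList.isEmpty then none
    else
      let cleaned0 := s.toList.map cleanStep
      let cleaned1 := PySem.Chars.stripChars cleaned0 ['-']
      let cleaned2 := collapseLoop cleaned1
      if cleaned2.isEmpty || !(cleaned2.any (fun ch => pyIsAscii ch && PySem.Chars.isalnum ch)) then none
      else some (String.mk cleaned2)

-- ===== PORT B =====
def bStep (st : List (List Char) × List Char) (ch : Char) : List (List Char) × List Char :=
  if ch.toNat ≤ 127 && PySem.Chars.isalnum ch then (st.1, st.2 ++ [PySem.Chars.lowerChar ch])
  else if st.2.isEmpty then st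
  else (st.1 ++ [st.2], [])

def clean_username_py_alt (name : Option String) : Option String :=
  match name with
  | none => none
  | some s =>
    if s.toList.isEmpty then none
    else
      let st := s.toList.foldl bStep ([], [])
      let words := if st.2.isEmpty then st.1 else st.1 ++ [st.2]
      if words.isEmpty then none
      else some (String.mk (PySem.Chars.join ['-'] words))

-- ===== PRECONDITION & SPEC =====
def Spec_clean_username_py (name : Option String) (out : Option String) : Prop := out = clean_username_py_alt name
instance (name : Option String) (out : Option String) : Decidable (Spec_clean_username_py name out) := by unfold Spec_clean_username_py; infer_instance

-- ===== CLAIM (what is proved, stated in full; the proofs are below) =====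
def Claim_equal_clean_username_py : Prop := ∀ (name : Option String), Dom_clean_username_py name → Spec_clean_username_py name (clean_username_py name)

-- ===== LEMMAS AND PROOFS =====

-- `nd c` = "c is not a hyphen" (a non-dash token)
def nd (c : Char) : Bool := c != '-'

-- maximal non-dash runs of a token list, in order
def wordsOf : List Char → List (List Char)
  | [] => []
  | c :: t => if c = '-' then wordsOf t else (c :: t.takeWhile nd) :: wordsOf (t.dropWhile nd)
termination_by l => l.length
decreasing_by
  · simp
  · have := List.length_dropWhile_le nd t; simp; omega

-- grouping pass with an explicit buffer (shape of B's fold)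
def gwords (buf : List Char) : List Char → List (List Char)
  | [] => if buf.isEmpty then [] else [buf]
  | c :: t => if nd c then gwords (buf ++ [c]) t else if buf.isEmpty then gwords [] t else buf :: gwords [] t

-- adjacent-dash collapse (the fixpoint of `rep`)
def dd : List Char → List Char
  | [] => []
  | [c] => [c]
  | c1 :: c2 :: t => if c1 = '-' ∧ c2 = '-' then dd ('-' :: t) else c1 :: dd (c2 :: t)
termination_by l => l.length
decreasing_by
  · simp
  · simp

-- join words with single dashes
def jn : List (List Char) → List Char
  | [] => []
  | [w] => w
  | w :: v :: ws => w ++ '-' :: jn (v :: ws)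

-- ---------- character-level facts ----------

theorem lower_pred (c : Char) (h : (pyIsAscii c && PySem.Chars.isalnum c) = true) :
    (pyIsAscii (PySem.Chars.lowerChar c) && PySem.Chars.isalnum (PySem.Chars.lowerChar c)) = true
      ∧ PySem.Chars.lowerChar c ≠ '-' := by
  by_cases hu : PySem.Chars.isupper c = true
  · have hb : 65 ≤ c.toNat ∧ c.toNat ≤ 90 := by
      simp [PySem.Chars.isupper, Char.le_def] at hu; exact ⟨hu.1, hu.2⟩
    have hv : (c.toNat + 32).isValidChar := by
      left; omega
    have htn : (Char.ofNat (c.toNat + 32)).toNat = c.toNat + 32 := by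
      rw [Char.toNat_ofNat, if_pos hv]
    have hlc : PySem.Chars.lowerChar c = Char.ofNat (c.toNat + 32) := by
      simp [PySem.Chars.lowerChar, hu]
    have htn' : ((Char.ofNat (c.toNat + 32)).val).toNat = c.toNat + 32 := htn
    constructor
    · rw [hlc]
      simp [pyIsAscii, PySem.Chars.isalnum, PySem.Chars.isalpha, PySem.Chars.islower,
        PySem.Chars.isupper, PySem.Chars.isdigit, Char.le_def, UInt32.le_iff_toNat_le, htn, htn']
      omega
    · rw [hlc]
      intro he
      have h2 := congrArg Char.toNat he
      rw [htn] at h2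
      have h45 : ('-' : Char).toNat = 45 := rfl
      omega
  · have hlc : PySem.Chars.lowerChar c = c := by simp [PySem.Chars.lowerChar, hu]
    refine ⟨by rw [hlc]; exact h, ?_⟩
    rw [hlc]
    intro he; subst he
    exact absurd h (by decide)

theorem cleanStep_ne_dash_iff (ch : Char) :
    cleanStep ch ≠ '-' ↔ (pyIsAscii ch && PySem.Chars.isalnum ch) = true := by
  unfold cleanStep
  by_cases h : (pyIsAscii ch && PySem.Chars.isalnum ch) = true
  · simp [h, (lower_pred ch h).2]
  · simp [h]

theorem token_pred (l : List Char) (c : Char) (hm : c ∈ List.map cleanStep l) (hc : c ≠ '-') :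
    (pyIsAscii c && PySem.Chars.isalnum c) = true := by
  rcases List.mem_map.mp hm with ⟨ch, _, rfl⟩
  have hok := (cleanStep_ne_dash_iff ch).mp hc
  unfold cleanStep
  rw [if_pos hok]
  exact (lower_pred ch hok).1

-- ---------- wordsOf facts ----------

theorem wordsOf_dropWhile_dash (cs : List Char) :
    wordsOf (cs.dropWhile (fun c => c == '-')) = wordsOf cs := by
  induction cs with
  | nil => simp
  | cons c t ih =>
    by_cases h : c = '-'
    · subst h; rw [List.dropWhile_cons_of_pos (by simp)]; rw [ih]; simp [wordsOf]
    · rw [List.dropWhile_cons_of_neg (by simp [h])]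

theorem wordsOf_all_dash (ds : List Char) (h : ∀ c ∈ ds, c = '-') : wordsOf ds = [] := by
  induction ds with
  | nil => simp [wordsOf]
  | cons c t ih =>
    have hc := h c (by simp)
    subst hc
    simp only [wordsOf, if_pos rfl]
    exact ih (fun c hc => h c (by simp [hc]))

theorem wordsOf_append_dash (n : Nat) : ∀ (cs ds : List Char), cs.length ≤ n →
    (∀ c ∈ ds, c = '-') → wordsOf (cs ++ ds) = wordsOf cs := by
  induction n with
  | zero =>
    intro cs ds hl hd
    have : cs = [] := List.length_eq_zero_iff.mp (Nat.le_zero.mp hl)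
    subst this
    simpa [wordsOf] using wordsOf_all_dash ds hd
  | succ n ih =>
    intro cs ds hl hd
    match cs with
    | [] => simpa [wordsOf] using wordsOf_all_dash ds hd
    | c :: t =>
      by_cases hc : c = '-'
      · subst hc
        simp only [List.cons_append, wordsOf, if_pos rfl]
        exact ih t ds (by simp at hl; omega) hd
      · simp only [List.cons_append, wordsOf, if_neg hc]
        by_cases hall : (List.takeWhile nd t).length = t.length
        · have ht : List.takeWhile nd t = t :=
            List.Sublist.eq_of_length (List.takeWhile_sublist nd) hall
          have htds : List.takeWhile nd ds = [] := by
            cases ds with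
            | nil => rfl
            | cons d ds' =>
              rw [List.takeWhile_cons_of_neg (by have := hd d (by simp); simp [nd, this])]
          have hdt : List.dropWhile nd t = [] := by
            rw [List.dropWhile_eq_nil_iff]
            intro x hx
            rw [← ht] at hx
            exact List.mem_takeWhile_imp hx
          have hdds : List.dropWhile nd ds = ds := by
            cases ds with
            | nil => rfl
            | cons d ds' =>
              rw [List.dropWhile_cons_of_neg (by have := hd d (by simp); simp [nd, this])]
          rw [List.takeWhile_append, if_pos hall, List.dropWhile_append, hdt, htds, hdds, ht]
          simp [wordsOf_all_dash ds hd, wordsOf]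
        · rw [List.takeWhile_append, if_neg hall]
          rw [List.dropWhile_append]
          have hne : (List.dropWhile nd t).isEmpty = false := by
            rcases h : List.dropWhile nd t with _ | _
            · exfalso
              have := List.takeWhile_append_dropWhile (p := nd) (l := t)
              rw [h, List.append_nil] at this
              exact hall (by rw [this])
            · simp
          rw [hne]
          simp only [Bool.false_eq_true, if_false]
          have := List.length_dropWhile_le nd t
          rw [ih (List.dropWhile nd t) ds (by simp at hl; omega) hd]

theorem wordsOf_mem (n : Nat) : ∀ (cs : List Char) w c, cs.length ≤ n →
    w ∈ wordsOf cs → c ∈ w → c ∈ cs ∧ c ≠ '-' := by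
  induction n with
  | zero =>
    intro cs w c hl hw hc
    have : cs = [] := List.length_eq_zero_iff.mp (Nat.le_zero.mp hl)
    subst this; simp [wordsOf] at hw
  | succ n ih =>
    intro cs w c hl hw hc
    match cs with
    | [] => simp [wordsOf] at hw
    | a :: t =>
      by_cases ha : a = '-'
      · subst ha
        simp only [wordsOf, if_pos rfl] at hw
        have := ih t w c (by simp at hl; omega) hw hc
        exact ⟨List.mem_cons_of_mem _ this.1, this.2⟩
      · simp only [wordsOf, if_neg ha] at hw
        rcases List.mem_cons.mp hw with rfl | hw'
        · rcases List.mem_cons.mp hc with rfl | hc'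
          · exact ⟨by simp, ha⟩
          · have h1 : c ∈ t := (List.takeWhile_sublist nd).mem hc'
            have h2 : nd c = true := List.mem_takeWhile_imp hc'
            exact ⟨List.mem_cons_of_mem _ h1, by simpa [nd] using h2⟩
        · have := ih (List.dropWhile nd t) w c
            (by have := List.length_dropWhile_le nd t; simp at hl; omega) hw' hc
          exact ⟨List.mem_cons_of_mem _ ((List.dropWhile_sublist nd).mem this.1), this.2⟩

theorem wordsOf_no_nil (n : Nat) : ∀ (cs : List Char) w, cs.length ≤ n →
    w ∈ wordsOf cs → w ≠ [] := by
  induction n with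
  | zero =>
    intro cs w hl hw
    have : cs = [] := List.length_eq_zero_iff.mp (Nat.le_zero.mp hl)
    subst this; simp [wordsOf] at hw
  | succ n ih =>
    intro cs w hl hw
    match cs with
    | [] => simp [wordsOf] at hw
    | a :: t =>
      by_cases ha : a = '-'
      · subst ha
        simp only [wordsOf, if_pos rfl] at hw
        exact ih t w (by simp at hl; omega) hw
      · simp only [wordsOf, if_neg ha] at hw
        rcases List.mem_cons.mp hw with rfl | hw'
        · simp
        · exact ih (List.dropWhile nd t) w
            (by have := List.length_dropWhile_le nd t; simp at hl; omega) hw'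

-- ---------- gwords = wordsOf, and B's fold computes gwords ----------

def flush (st : List (List Char) × List Char) : List (List Char) :=
  if st.2.isEmpty then st.1 else st.1 ++ [st.2]

theorem gwords_spec (cs : List Char) : ∀ buf,
    gwords buf cs = if buf.isEmpty then wordsOf cs
      else (buf ++ cs.takeWhile nd) :: wordsOf (cs.dropWhile nd) := by
  induction cs with
  | nil =>
    intro buf
    cases buf with
    | nil => simp [gwords, wordsOf]
    | cons b bs => simp [gwords, wordsOf]
  | cons c t ih =>
    intro buf
    by_cases hc : nd c = true
    · have hc' : ¬ c = '-' := by simpa [nd] using hc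
      rw [show gwords buf (c :: t) = gwords (buf ++ [c]) t by simp [gwords, hc]]
      rw [ih (buf ++ [c])]
      rw [List.takeWhile_cons_of_pos hc, List.dropWhile_cons_of_pos hc]
      cases buf with
      | nil => simp [wordsOf, hc']
      | cons b bs => simp
    · have hc' : c = '-' := by simpa [nd] using hc
      subst hc'
      rw [List.takeWhile_cons_of_neg (by simpa using hc),
        List.dropWhile_cons_of_neg (by simpa using hc)]
      cases buf with
      | nil =>
        rw [show gwords [] ('-' :: t) = gwords [] t by simp [gwords, hc]]
        rw [ih []]
        simp [wordsOf]
      | cons b bs =>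
        rw [show gwords (b :: bs) ('-' :: t) = (b :: bs) :: gwords [] t by simp [gwords, hc]]
        rw [ih []]
        simp [wordsOf]

theorem fold_gwords (cs : List Char) : ∀ ws buf,
    flush (cs.foldl bStep (ws, buf)) = ws ++ gwords buf (cs.map cleanStep) := by
  induction cs with
  | nil =>
    intro ws buf
    cases buf with
    | nil => simp [flush, gwords]
    | cons b bs => simp [flush, gwords]
  | cons c t ih =>
    intro ws buf
    rw [List.foldl_cons, List.map_cons]
    by_cases hok : (c.toNat ≤ 127 && PySem.Chars.isalnum c) = true
    · have hok' : (pyIsAscii c && PySem.Chars.isalnum c) = true := by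
        simpa [pyIsAscii] using hok
      have hcs : cleanStep c = PySem.Chars.lowerChar c := by
        unfold cleanStep; rw [if_pos hok']
      have hnd : nd (PySem.Chars.lowerChar c) = true := by
        simp [nd, (lower_pred c hok').2]
      rw [show bStep (ws, buf) c = (ws, buf ++ [PySem.Chars.lowerChar c]) by
        simp [bStep, hok]]
      rw [ih ws (buf ++ [PySem.Chars.lowerChar c]), hcs]
      rw [show gwords buf (PySem.Chars.lowerChar c :: List.map cleanStep t)
            = gwords (buf ++ [PySem.Chars.lowerChar c]) (List.map cleanStep t) by
        simp [gwords, hnd]]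
    · have hcs : cleanStep c = '-' := by
        unfold cleanStep
        rw [if_neg (by simpa [pyIsAscii] using hok)]
      rw [hcs]
      cases buf with
      | nil =>
        rw [show bStep (ws, []) c = (ws, []) by simp [bStep, hok]]
        rw [ih ws []]
        rw [show gwords [] ('-' :: List.map cleanStep t) = gwords [] (List.map cleanStep t) by
          simp [gwords, nd]]
      | cons b bs =>
        rw [show bStep (ws, b :: bs) c = (ws ++ [b :: bs], []) by simp [bStep, hok]]
        rw [ih (ws ++ [b :: bs]) []]
        rw [show gwords (b :: bs) ('-' :: List.map cleanStep t)
              = (b :: bs) :: gwords [] (List.map cleanStep t) by simp [gwords, nd]]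
        simp

-- ---------- dd facts ----------

theorem dd_cons_ne (a : Char) (r : List Char) (ha : a ≠ '-') : dd (a :: r) = a :: dd r := by
  match r with
  | [] => simp [dd]
  | c :: t => rw [dd]; rw [if_neg (by rintro ⟨h1, _⟩; exact ha h1)]

theorem dd_cons_word (w r : List Char) (hw : ∀ c ∈ w, c ≠ '-') : dd (w ++ r) = w ++ dd r := by
  induction w with
  | nil => simp
  | cons a t ih =>
    rw [List.cons_append, dd_cons_ne a _ (hw a (by simp)), ih (fun c hc => hw c (by simp [hc]))]
    rfl

theorem dd_dash (n : Nat) : ∀ r, r.length ≤ n →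
    dd ('-' :: r) = '-' :: dd (r.dropWhile (fun c => c == '-')) := by
  induction n with
  | zero =>
    intro r hl
    have : r = [] := List.length_eq_zero_iff.mp (Nat.le_zero.mp hl)
    subst this; simp [dd]
  | succ n ih =>
    intro r hl
    match r with
    | [] => simp [dd]
    | c :: t =>
      by_cases hc : c = '-'
      · subst hc
        rw [show dd ('-' :: '-' :: t) = dd ('-' :: t) by rw [dd]; rw [if_pos ⟨rfl, rfl⟩]]
        rw [ih t (by simp at hl; omega)]
        rw [List.dropWhile_cons_of_pos (by simp)]
      · rw [List.dropWhile_cons_of_neg (by simp [hc])]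
        rw [show dd ('-' :: c :: t) = '-' :: dd (c :: t) by
          rw [dd]; rw [if_neg (by rintro ⟨_, h2⟩; exact hc h2)]]

-- dd on a list with no adjacent dashes is the identity
theorem dd_no_infix (cs : List Char) (h : ¬ ['-','-'] <:+: cs) : dd cs = cs := by
  induction cs using dd.induct with
  | case1 => simp [dd]
  | case2 c => simp [dd]
  | case3 c1 c2 t hd ih =>
    obtain ⟨h1, h2⟩ := hd; subst h1; subst h2
    exact absurd ⟨[], t, rfl⟩ h
  | case4 c1 c2 t hd ih =>
    rw [dd, if_neg hd, ih]
    intro ⟨p, s, hps⟩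
    exact h ⟨c1 :: p, s, by rw [← hps]; rfl⟩

theorem dd_rep_pair (n : Nat) : ∀ l, l.length ≤ n →
    dd (rep l) = dd l ∧ dd ('-' :: rep l) = dd ('-' :: l) := by
  induction n with
  | zero =>
    intro l hl
    have : l = [] := List.length_eq_zero_iff.mp (Nat.le_zero.mp hl)
    subst this; exact ⟨rfl, rfl⟩
  | succ n ih =>
    intro l hl
    match l with
    | [] => exact ⟨rfl, rfl⟩
    | [c] => constructor <;> simp [rep]
    | c1 :: c2 :: t =>
      have hlt : t.length ≤ n := by simp at hl; omega
      have hlt2 : (c2 :: t).length ≤ n := by simp at hl ⊢; omega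
      by_cases hd : c1 = '-' ∧ c2 = '-'
      · obtain ⟨h1, h2⟩ := hd; subst h1; subst h2
        have hr : rep ('-' :: '-' :: t) = '-' :: rep t := by rw [rep]; rw [if_pos ⟨rfl, rfl⟩]
        have e1 : dd ('-' :: '-' :: t) = dd ('-' :: t) := by rw [dd]; rw [if_pos ⟨rfl, rfl⟩]
        have e2 : dd ('-' :: '-' :: rep t) = dd ('-' :: rep t) := by
          rw [dd]; rw [if_pos ⟨rfl, rfl⟩]
        refine ⟨?_, ?_⟩
        · rw [hr, (ih t hlt).2, e1]
        · rw [hr, e2, (ih t hlt).2, e1.symm]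
          rw [show dd ('-' :: '-' :: '-' :: t) = dd ('-' :: '-' :: t) by
            rw [dd]; rw [if_pos ⟨rfl, rfl⟩]]
      · have hr : rep (c1 :: c2 :: t) = c1 :: rep (c2 :: t) := by
          rw [rep]; rw [if_neg hd]
        have first : dd (c1 :: rep (c2 :: t)) = dd (c1 :: c2 :: t) := by
          by_cases h1 : c1 = '-'
          · subst h1
            exact (ih (c2 :: t) hlt2).2
          · rw [dd_cons_ne c1 _ h1, dd_cons_ne c1 _ h1, (ih (c2 :: t) hlt2).1]
        refine ⟨by rw [hr, first], ?_⟩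
        rw [hr]
        by_cases h1 : c1 = '-'
        · subst h1
          rw [show dd ('-' :: '-' :: rep (c2 :: t)) = dd ('-' :: rep (c2 :: t)) by
            rw [dd]; rw [if_pos ⟨rfl, rfl⟩]]
          rw [show dd ('-' :: '-' :: c2 :: t) = dd ('-' :: c2 :: t) by
            rw [dd]; rw [if_pos ⟨rfl, rfl⟩]]
          exact first
        · rw [show dd ('-' :: c1 :: rep (c2 :: t)) = '-' :: dd (c1 :: rep (c2 :: t)) by
            rw [dd]; rw [if_neg (by rintro ⟨_, h⟩; exact h1 h)]]
          rw [show dd ('-' :: c1 :: c2 :: t) = '-' :: dd (c1 :: c2 :: t) by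
            rw [dd]; rw [if_neg (by rintro ⟨_, h⟩; exact h1 h)]]
          rw [first]

theorem collapse_eq_dd (n : Nat) : ∀ cs, cs.length ≤ n → collapseLoop cs = dd cs := by
  induction n with
  | zero =>
    intro cs hl
    have : cs = [] := List.length_eq_zero_iff.mp (Nat.le_zero.mp hl)
    subst this
    rw [collapseLoop]
    rw [if_neg (by decide)]
    simp [dd]
  | succ n ih =>
    intro cs hl
    rw [collapseLoop]
    by_cases hin : PySem.Chars.isIn ['-','-'] cs = true
    · rw [if_pos hin, replace_eq_rep]
      have hinf := (PySem.Chars.isIn_iff_infix _ _).mp hin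
      have hlt := rep_length_lt cs hinf
      rw [ih (rep cs) (by omega)]
      exact (dd_rep_pair cs.length cs le_rfl).1
    · rw [if_neg hin]
      exact (dd_no_infix cs (by
        rw [← PySem.Chars.isIn_iff_infix]
        simpa using hin)).symm

-- ---------- dd of a stripped list is the dash-join of its words ----------

theorem all_dash_getLast (l : List Char) (h : ∀ c ∈ l, c = '-') (hne : l ≠ []) :
    l.getLast? = some '-' := by
  rw [List.getLast?_eq_getLast hne]
  exact congrArg some (h _ (List.getLast_mem hne))

theorem dropWhile_head_not (p : Char → Bool) (l : List Char) (d : Char) (r : List Char)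
    (h : l.dropWhile p = d :: r) : p d = false := by
  induction l with
  | nil => simp at h
  | cons a t ih =>
    by_cases hp : p a
    · rw [List.dropWhile_cons_of_pos hp] at h; exact ih h
    · rw [List.dropWhile_cons_of_neg hp] at h
      injection h with h1 _
      subst h1
      simpa using hp

theorem dd_jn (n : Nat) : ∀ cs : List Char, cs.length ≤ n → cs.head? ≠ some '-' →
    cs.getLast? ≠ some '-' → dd cs = jn (wordsOf cs) := by
  induction n with
  | zero =>
    intro cs hl _ _
    have : cs = [] := List.length_eq_zero_iff.mp (Nat.le_zero.mp hl)
    subst this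
    simp [dd, wordsOf, jn]
  | succ n ih =>
    intro cs hl hh hg
    match cs with
    | [] => simp [dd, wordsOf, jn]
    | c :: t =>
      have hc : c ≠ '-' := by simpa using hh
      have hw : ∀ x ∈ c :: t.takeWhile nd, x ≠ '-' := by
        intro x hx
        rcases List.mem_cons.mp hx with rfl | hx'
        · exact hc
        · have := List.mem_takeWhile_imp hx'
          simpa [nd] using this
      have hsplit : c :: t = (c :: t.takeWhile nd) ++ t.dropWhile nd := by
        simp [List.takeWhile_append_dropWhile]
      have hwords : wordsOf (c :: t) = (c :: t.takeWhile nd) :: wordsOf (t.dropWhile nd) := by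
        rw [wordsOf]; rw [if_neg hc]
      rw [hwords]
      conv_lhs => rw [hsplit]
      rw [dd_cons_word _ _ hw]
      rcases hr : t.dropWhile nd with _ | ⟨rc, r2⟩
      · simp [dd, wordsOf, jn]
      · have hrc : rc = '-' := by
          have := dropWhile_head_not nd t rc r2 hr
          simpa [nd] using this
        subst hrc
        -- r3 := dropWhile dash r2
        have hdd : dd ('-' :: r2) = '-' :: dd (r2.dropWhile (fun c => c == '-')) :=
          dd_dash r2.length r2 le_rfl
        have hr3ne : r2.dropWhile (fun c => c == '-') ≠ [] := by
          intro h3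
          have hall : ∀ c ∈ r2, c = '-' := by
            intro x hx
            have := List.dropWhile_eq_nil_iff.mp h3 x hx
            simpa using this
          have : (c :: t).getLast? = some '-' := by
            rw [hsplit, hr]
            rw [List.getLast?_append_of_ne_nil _ (l₂ := '-' :: r2) (by simp)]
            exact all_dash_getLast _ (by
              intro x hx
              rcases List.mem_cons.mp hx with rfl | hx'
              · rfl
              · exact hall x hx') (by simp)
          exact hg this
        have hlast : (r2.dropWhile (fun c => c == '-')).getLast? = (c :: t).getLast? := by
          rcases List.dropWhile_suffix (l := r2) (p := fun c => c == '-') with ⟨pre, hpre⟩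
          rw [hsplit, hr]
          rw [List.getLast?_append_of_ne_nil _ (l₂ := '-' :: r2) (by simp)]
          rw [show ('-' :: r2 : List Char) = ('-' :: pre) ++ r2.dropWhile (fun c => c == '-') by
            rw [List.cons_append, hpre]]
          rw [List.getLast?_append_of_ne_nil _ hr3ne]
        have hhead : (r2.dropWhile (fun c => c == '-')).head? ≠ some '-' := by
          rcases h3 : r2.dropWhile (fun c => c == '-') with _ | ⟨d, r4⟩
          · simp
          · have := dropWhile_head_not _ r2 d r4 h3
            simp only [List.head?_cons]
            intro he
            have hd : d = '-' := by simpa using he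
            subst hd
            simp at this
        have hlen : (r2.dropWhile (fun c => c == '-')).length ≤ n := by
          have h1 := List.length_dropWhile_le (fun c => c == '-') r2
          have h2 := List.length_dropWhile_le nd t
          rw [hr] at h2
          simp at hl h2
          omega
        have hih := ih (r2.dropWhile (fun c => c == '-')) hlen hhead (by rw [hlast]; exact hg)
        rw [hdd, hih]
        -- words of the tail
        have hwr : wordsOf ('-' :: r2) = wordsOf (r2.dropWhile (fun c => c == '-')) := by
          rw [show wordsOf ('-' :: r2) = wordsOf r2 by rw [wordsOf]; rw [if_pos rfl]]
          exact (wordsOf_dropWhile_dash r2).symm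
        rw [hwr]
        -- wordsOf r3 is a cons
        rcases h3 : r2.dropWhile (fun c => c == '-') with _ | ⟨d, r4⟩
        · exact absurd h3 hr3ne
        · have hd : d ≠ '-' := by
            rw [h3] at hhead; simpa using hhead
          rw [show wordsOf (d :: r4) = (d :: r4.takeWhile nd) :: wordsOf (r4.dropWhile nd) by
            rw [wordsOf]; rw [if_neg hd]]
          rw [show jn ((c :: List.takeWhile nd t) :: (d :: r4.takeWhile nd) :: wordsOf (r4.dropWhile nd))
                = (c :: List.takeWhile nd t) ++ '-' :: jn ((d :: r4.takeWhile nd) :: wordsOf (r4.dropWhile nd)) by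
            rw [jn]]

-- ---------- stripChars facts ----------

theorem contains_dash (c : Char) : (['-'] : List Char).contains c = (c == '-') := by
  by_cases h : c = '-'
  · subst h; decide
  · have h1 : (c == '-') = false := by simpa using h
    simp only [List.contains_cons, List.contains_nil, Bool.or_false, h1]

theorem strip_parts (cs : List Char) :
    ∃ ds : List Char, (∀ c ∈ ds, c = '-') ∧
      cs.dropWhile (fun c => c == '-') = PySem.Chars.stripChars cs ['-'] ++ ds := by
  unfold PySem.Chars.stripChars
  have hfun : (fun c => (['-'] : List Char).contains c) = (fun c => c == '-') := by
    funext c; exact contains_dash c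
  rw [hfun]
  refine ⟨((cs.dropWhile (fun c => c == '-')).reverse.takeWhile (fun c => c == '-')).reverse,
    ?_, ?_⟩
  · intro x hx
    rw [List.mem_reverse] at hx
    simpa using List.mem_takeWhile_imp hx
  · conv_lhs => rw [show cs.dropWhile (fun c => c == '-')
      = ((cs.dropWhile (fun c => c == '-')).reverse).reverse by simp]
    conv_lhs => rw [← List.takeWhile_append_dropWhile
      (p := fun c => c == '-') (l := (cs.dropWhile (fun c => c == '-')).reverse)]
    rw [List.reverse_append]

theorem strip_head (cs : List Char) :
    (PySem.Chars.stripChars cs ['-']).head? ≠ some '-' := by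
  obtain ⟨ds, hds, heq⟩ := strip_parts cs
  rcases hst : PySem.Chars.stripChars cs ['-'] with _ | ⟨a, st'⟩
  · simp
  · have hdw : cs.dropWhile (fun c => c == '-') = a :: (st' ++ ds) := by
      rw [heq, hst]; simp
    have := dropWhile_head_not _ cs a _ hdw
    simp only [List.head?_cons]
    intro he
    have ha : a = '-' := by simpa using he
    subst ha
    simp at this

theorem strip_getLast (cs : List Char) :
    (PySem.Chars.stripChars cs ['-']).getLast? ≠ some '-' := by
  unfold PySem.Chars.stripChars
  have hfun : (fun c => (['-'] : List Char).contains c) = (fun c => c == '-') := by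
    funext c; exact contains_dash c
  rw [hfun]
  rw [List.getLast?_reverse]
  rcases h3 : (cs.dropWhile (fun c => c == '-')).reverse.dropWhile (fun c => c == '-')
      with _ | ⟨d, r4⟩
  · simp
  · have := dropWhile_head_not _ (cs.dropWhile (fun c => c == '-')).reverse d r4 h3
    simp only [List.head?_cons]
    intro he
    have hd : d = '-' := by simpa using he
    subst hd
    simp at this

theorem strip_words (cs : List Char) :
    wordsOf (PySem.Chars.stripChars cs ['-']) = wordsOf cs := by
  obtain ⟨ds, hds, heq⟩ := strip_parts cs
  have h1 : wordsOf (PySem.Chars.stripChars cs ['-'] ++ ds)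
      = wordsOf (PySem.Chars.stripChars cs ['-']) :=
    wordsOf_append_dash (PySem.Chars.stripChars cs ['-']).length _ ds le_rfl hds
  rw [← heq] at h1
  rw [← h1, wordsOf_dropWhile_dash]

theorem strip_nil_iff (cs : List Char) :
    PySem.Chars.stripChars cs ['-'] = [] ↔ wordsOf cs = [] := by
  constructor
  · intro h
    rw [← strip_words cs, h]
    simp [wordsOf]
  · intro h
    rcases hst : PySem.Chars.stripChars cs ['-'] with _ | ⟨a, st'⟩
    · rfl
    · exfalso
      have hw : wordsOf (a :: st') = [] := by
        rw [← hst, strip_words, h]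
      have ha : a ≠ '-' := by
        have := strip_head cs
        rw [hst] at this; simpa using this
      rw [wordsOf] at hw
      rw [if_neg ha] at hw
      exact List.cons_ne_nil _ _ hw

-- ---------- jn = PySem join ----------

theorem jn_eq_join (ws : List (List Char)) : jn ws = PySem.Chars.join ['-'] ws := by
  induction ws using jn.induct with
  | case1 => simp [jn, PySem.Chars.join, List.intercalate]
  | case2 w => simp [jn, PySem.Chars.join, List.intercalate]
  | case3 w v ws ih =>
    rw [jn, ih]
    simp [PySem.Chars.join, List.intercalate, List.intersperse]


-- ---------- assembly ----------

theorem main_eq (s : String) : clean_username_py (some s) = clean_username_py_alt (some s) := by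
  rw [clean_username_py, clean_username_py_alt]
  by_cases hs : s.toList.isEmpty
  · rw [if_pos hs, if_pos hs]
  · rw [if_neg hs, if_neg hs]
    dsimp only
    have hflush : (let st := s.toList.foldl bStep ([], []);
        if st.2.isEmpty then st.1 else st.1 ++ [st.2]) = flush (s.toList.foldl bStep ([], [])) := rfl
    have hwordsB : flush (s.toList.foldl bStep ([], []))
        = wordsOf (s.toList.map cleanStep) := by
      rw [fold_gwords s.toList [] [], gwords_spec]
      simp
    have hcoll : collapseLoop (PySem.Chars.stripChars (s.toList.map cleanStep) ['-'])
        = dd (PySem.Chars.stripChars (s.toList.map cleanStep) ['-']) :=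
      collapse_eq_dd _ _ le_rfl
    have hdd := dd_jn (PySem.Chars.stripChars (s.toList.map cleanStep) ['-']).length
      (PySem.Chars.stripChars (s.toList.map cleanStep) ['-']) le_rfl
      (strip_head _) (strip_getLast _)
    rw [strip_words] at hdd
    by_cases hW : wordsOf (s.toList.map cleanStep) = []
    · -- both return none
      have hstnil : PySem.Chars.stripChars (s.toList.map cleanStep) ['-'] = [] :=
        (strip_nil_iff _).mpr hW
      have hcnil : collapseLoop (PySem.Chars.stripChars (s.toList.map cleanStep) ['-']) = [] := by
        rw [hstnil, collapse_eq_dd 0 [] (by simp)]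
        simp [dd]
      rw [hcnil]
      rw [if_pos (by simp)]
      rw [hflush, hwordsB, hW]
      rw [if_pos (by simp)]
    · rcases hWc : wordsOf (s.toList.map cleanStep) with _ | ⟨w, ws⟩
      · exact absurd hWc hW
      · have hwne : w ≠ [] :=
          wordsOf_no_nil (s.toList.map cleanStep).length _ w le_rfl (by rw [hWc]; simp)
        rcases hwc : w with _ | ⟨wc, w'⟩
        · exact absurd hwc hwne
        · have hwcmem : wc ∈ s.toList.map cleanStep ∧ wc ≠ '-' :=
            wordsOf_mem (s.toList.map cleanStep).length _ w wc le_rfl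
              (by rw [hWc]; simp) (by rw [hwc]; simp)
          have hpred : (pyIsAscii wc && PySem.Chars.isalnum wc) = true :=
            token_pred _ _ hwcmem.1 hwcmem.2
          have hmemjn : wc ∈ jn (w :: ws) := by
            cases ws with
            | nil => rw [jn, hwc]; simp
            | cons v ws' =>
              rw [jn]
              exact List.mem_append_left _ (by rw [hwc]; simp)
          have hjnne : jn (w :: ws) ≠ [] := List.ne_nil_of_mem hmemjn
          rw [hWc] at hdd
          rw [hcoll, hdd]
          rw [if_neg (by
            simp only [Bool.or_eq_true, List.isEmpty_iff, Bool.not_eq_true']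
            push_neg
            constructor
            · exact hjnne
            · have hany : (jn (w :: ws)).any
                  (fun ch => pyIsAscii ch && PySem.Chars.isalnum ch) = true :=
                List.any_eq_true.mpr ⟨wc, hmemjn, hpred⟩
              simp [hany])]
          rw [hflush, hwordsB, hWc]
          rw [if_neg (by simp)]
          rw [jn_eq_join]

-- ===== VERDICT (by name: the statement is the Claim_ definition above) =====
theorem clean_username_py_spec : Claim_equal_clean_username_py := by
  intro name _
  unfold Spec_clean_username_py
  cases name with
  | none => rfl
  | some s => exact main_eq s
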